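-- pv_equiv track=rewrite | github.com/nategriffin26/singing-motors | src/music2/cli.py | _segment_short_counts
-- ===== SOURCE A (Python) =====
-- def _segment_short_counts(durations_us: list[int]) -> dict[str, int]:
--     return {
--         "<=200us": sum(1 for value in durations_us if value <= 200),
--         "<=500us": sum(1 for value in durations_us if value <= 500),
--         "<=1ms": sum(1 for value in durations_us if value <= 1_000),
--         "<=2ms": sum(1 for value in durations_us if value <= 2_000),
--         "<=5ms": sum(1 for value in durations_us if value <= 5_000),
--     }
-- ===== SOURCE B (Python) =====
-- def _segment_short_counts(durations_us: list[int]) -> dict[str, int]: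
--     c200 = c500 = c1ms = c2ms = c5ms = 0
--     for value in durations_us:
--         if value <= 200:
--             c200 += 1
--         if value <= 500:
--             c500 += 1
--         if value <= 1_000:
--             c1ms += 1
--         if value <= 2_000:
--             c2ms += 1
--         if value <= 5_000:
--             c5ms += 1
--     return {
--         "<=200us": c200,
--         "<=500us": c500,
--         "<=1ms": c1ms,
--         "<=2ms": c2ms,
--         "<=5ms": c5ms,
--     }
-- ===== Notes on version B (the rewrite author's own statement) =====
-- stated objective: alternative
-- what changed: Replaces five separate generator-sum scans of the list with a single pass that maintains five running counters updated per element.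
import Mathlib
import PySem

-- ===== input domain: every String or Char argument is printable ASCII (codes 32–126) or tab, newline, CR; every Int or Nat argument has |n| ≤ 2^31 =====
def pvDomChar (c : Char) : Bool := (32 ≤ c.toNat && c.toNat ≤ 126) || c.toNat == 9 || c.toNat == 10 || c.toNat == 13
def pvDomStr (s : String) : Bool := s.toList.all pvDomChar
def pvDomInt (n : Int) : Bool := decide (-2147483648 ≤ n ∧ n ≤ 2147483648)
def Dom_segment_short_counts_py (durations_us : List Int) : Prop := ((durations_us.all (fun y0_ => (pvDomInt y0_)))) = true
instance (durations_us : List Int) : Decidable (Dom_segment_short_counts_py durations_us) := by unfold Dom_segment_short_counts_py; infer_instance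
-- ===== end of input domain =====

-- B replaces A's five separate scans of the list by one pass maintaining five counters (alternative decomposition, same result).

-- ===== PORT A =====
-- A: five independent generator sums, one per threshold.
def segment_short_counts_py (durations_us : List Int) : List (String × Int) :=
  [ ("<=200us", durations_us.foldl (fun acc value => if value ≤ 200 then acc + 1 else acc) 0),
    ("<=500us", durations_us.foldl (fun acc value => if value ≤ 500 then acc + 1 else acc) 0),
    ("<=1ms",   durations_us.foldl (fun acc value => if value ≤ 1000 then acc + 1 else acc) 0),
    ("<=2ms",   durations_us.foldl (fun acc value => if value ≤ 2000 then acc + 1 else acc) 0),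
    ("<=5ms",   durations_us.foldl (fun acc value => if value ≤ 5000 then acc + 1 else acc) 0) ]

-- ===== PORT B =====
-- B: single loop over the list updating a 5-tuple of counters.
def sscStep (acc : Int × Int × Int × Int × Int) (value : Int) : Int × Int × Int × Int × Int :=
  let (c200, c500, c1ms, c2ms, c5ms) := acc
  let c200 := if value ≤ 200 then c200 + 1 else c200
  let c500 := if value ≤ 500 then c500 + 1 else c500
  let c1ms := if value ≤ 1000 then c1ms + 1 else c1ms
  let c2ms := if value ≤ 2000 then c2ms + 1 else c2ms
  let c5ms := if value ≤ 5000 then c5ms + 1 else c5ms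
  (c200, c500, c1ms, c2ms, c5ms)

def segment_short_counts_py_alt (durations_us : List Int) : List (String × Int) :=
  let (c200, c500, c1ms, c2ms, c5ms) := durations_us.foldl sscStep (0, 0, 0, 0, 0)
  [ ("<=200us", c200), ("<=500us", c500), ("<=1ms", c1ms), ("<=2ms", c2ms), ("<=5ms", c5ms) ]

-- ===== PRECONDITION & SPEC =====
def Spec_segment_short_counts_py (durations_us : List Int) (out : List (String × Int)) : Prop := out = segment_short_counts_py_alt durations_us
instance (durations_us : List Int) (out : List (String × Int)) : Decidable (Spec_segment_short_counts_py durations_us out) := by unfold Spec_segment_short_counts_py; infer_instance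

-- ===== CLAIM (what is proved, stated in full; the proofs are below) =====
def Claim_equal_segment_short_counts_py : Prop := ∀ (durations_us : List Int), Dom_segment_short_counts_py durations_us → Spec_segment_short_counts_py durations_us (segment_short_counts_py durations_us)

-- ===== LEMMAS AND PROOFS =====
-- Invariant of B's single loop: the tuple fold equals the five independent folds, each offset by its start value.
theorem sscStep_foldl (xs : List Int) (a b c d e : Int) :
    xs.foldl sscStep (a, b, c, d, e) =
      (xs.foldl (fun acc value => if value ≤ 200 then acc + 1 else acc) a,
       xs.foldl (fun acc value => if value ≤ 500 then acc + 1 else acc) b,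
       xs.foldl (fun acc value => if value ≤ 1000 then acc + 1 else acc) c,
       xs.foldl (fun acc value => if value ≤ 2000 then acc + 1 else acc) d,
       xs.foldl (fun acc value => if value ≤ 5000 then acc + 1 else acc) e) := by
  induction xs generalizing a b c d e with
  | nil => rfl
  | cons x xs ih =>
    simp only [List.foldl_cons, sscStep]
    split_ifs <;> exact ih ..

-- ===== VERDICT (by name: the statement is the Claim_ definition above) =====
theorem segment_short_counts_py_spec : Claim_equal_segment_short_counts_py := by
  intro xs _
  unfold Spec_segment_short_counts_py segment_short_counts_py segment_short_counts_py_alt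
  rw [sscStep_foldl]
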